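-- pv_equiv track=rewrite | github.com/cyberclasssd/Summer-CTF-2022-Writeups | rev/b00p/b00p.py | boop
-- ===== SOURCE A (Python) =====
-- def boop(noise):
--
--   ret = ""
--
--   for i in range(len(noise)):
--     if (i % 2 == 0):
--       ret += noise[i]
--     else:
--       ret += noise[len(noise) - i]
--   return ret == "f}ap{0lp00wf0gyl"
-- ===== SOURCE B (Python) =====
-- def boop(noise):
--     # The map i -> (i if i % 2 == 0 else len(noise) - i) is a self-inverse
--     # permutation of the positions of a length-16 string, and the comparison can
--     # only succeed when len(noise) == 16 (the scrambled string has the same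
--     # length as noise).  Applying that permutation once to the constant.
--     # "f}ap{0lp00wf0gyl" therefore yields the unique accepted input, so the
--     # whole loop collapses to a single string comparison.
--     return noise == "flag{fl00pw00py}"
-- ===== Notes on version B (the rewrite author's own statement) =====
-- stated objective: faster
-- what changed: Replaces the character-by-character scramble-and-compare loop by a single comparison of the input with the precomputed unique preimage of the constant (the position permutation is an involution and the check can only pass at length 16).
import Mathlib
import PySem

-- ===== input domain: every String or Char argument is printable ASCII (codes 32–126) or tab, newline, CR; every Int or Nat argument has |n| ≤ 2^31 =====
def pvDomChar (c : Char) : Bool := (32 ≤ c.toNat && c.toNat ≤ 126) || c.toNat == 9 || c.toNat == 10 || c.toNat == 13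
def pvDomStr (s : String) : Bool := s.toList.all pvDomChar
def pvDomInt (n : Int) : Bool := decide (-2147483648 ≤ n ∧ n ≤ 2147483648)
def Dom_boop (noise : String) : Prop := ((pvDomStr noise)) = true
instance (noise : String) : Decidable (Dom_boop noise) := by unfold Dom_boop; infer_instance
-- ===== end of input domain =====

-- B replaces A's scramble-and-compare loop by one comparison with the unique preimage of the
-- constant (the index permutation is an involution and the check only passes at length 16).

-- ===== PORT A =====
-- literal port of A: build ret character by character over range(len(noise)), then compare.
-- noise[i] / noise[len(noise)-i] are always in range here, so pyGetD's default is never used.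
def boop (noise : String) : Bool :=
  ((PySem.List.pyRange 0 (PySem.List.len noise.toList) 1).foldl
    (fun ret i =>
      if i % 2 == 0 then ret ++ [PySem.List.pyGetD noise.toList i '?']
      else ret ++ [PySem.List.pyGetD noise.toList (PySem.List.len noise.toList - i) '?']) [])
  == "f}ap{0lp00wf0gyl".toList

-- ===== PORT B =====
def boop_alt (noise : String) : Bool := noise == "flag{fl00pw00py}"

-- ===== PRECONDITION & SPEC =====
def Spec_boop (noise : String) (out : Bool) : Prop := out = boop_alt noise
instance (noise : String) (out : Bool) : Decidable (Spec_boop noise out) := by unfold Spec_boop; infer_instance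

-- ===== CLAIM (what is proved, stated in full; the proofs are below) =====
def Claim_equal_boop : Prop := ∀ (noise : String), Dom_boop noise → Spec_boop noise (boop noise)

-- ===== LEMMAS AND PROOFS =====

theorem foldl_append_singleton {α β : Type} (g : β → α) :
    ∀ (L : List β) (init : List α),
      L.foldl (fun acc x => acc ++ [g x]) init = init ++ L.map g := by
  intro L
  induction L with
  | nil => intro init; simp
  | cons x L ih => intro init; simp [List.foldl_cons, ih]

theorem string_beq_eq_toList_beq (s t : String) :
    (s == t) = (s.toList == t.toList) := by
  rcases eq_or_ne s t with rfl | h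
  · simp
  · have h' : s.toList ≠ t.toList := fun hc => h (String.toList_inj.mp hc)
    simp [h, h']

set_option maxHeartbeats 1000000 in
theorem boop_key (noise : String) :
    boop noise = boop_alt noise := by
  unfold boop boop_alt
  rw [string_beq_eq_toList_beq]
  rw [show "f}ap{0lp00wf0gyl".toList =
        ['f','}','a','p','{','0','l','p','0','0','w','f','0','g','y','l'] from by decide]
  rw [show "flag{fl00pw00py}".toList =
        ['f','l','a','g','{','f','l','0','0','p','w','0','0','p','y','}'] from by decide]
  generalize noise.toList = cs
  have hfun :
      (fun (ret : List Char) (i : Int) =>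
        if i % 2 == 0 then ret ++ [PySem.List.pyGetD cs i '?']
        else ret ++ [PySem.List.pyGetD cs ((PySem.List.len cs) - i) '?'])
      = (fun ret i => ret ++ [if i % 2 == 0 then PySem.List.pyGetD cs i '?'
          else PySem.List.pyGetD cs ((PySem.List.len cs) - i) '?']) := by
    funext ret i; split <;> rfl
  rw [hfun, foldl_append_singleton, List.nil_append]
  by_cases hl : cs.length = 16
  · -- length 16: destructure and compare componentwise
    rcases cs with _|⟨c0,_|⟨c1,_|⟨c2,_|⟨c3,_|⟨c4,_|⟨c5,_|⟨c6,_|⟨c7,_|⟨c8,_|⟨c9,_|⟨c10,_|⟨c11,_|⟨c12,_|⟨c13,_|⟨c14,_|⟨c15,_|⟨c16,cs⟩⟩⟩⟩⟩⟩⟩⟩⟩⟩⟩⟩⟩⟩⟩⟩⟩ <;>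
      simp only [List.length_cons, List.length_nil] at hl <;> try omega
    rw [Bool.eq_iff_iff]
    simp only [beq_iff_eq]
    rw [show (PySem.List.len [c0, c1, c2, c3, c4, c5, c6, c7, c8, c9, c10, c11, c12, c13, c14, c15]) = (16:Int) by simp]
    rw [show (PySem.List.pyRange 0 16) = [0,1,2,3,4,5,6,7,8,9,10,11,12,13,14,15] from by decide]
    norm_num [PySem.List.pyGetD_ofNat']
    tauto
  · -- other lengths: both comparisons fail on length grounds
    rw [Bool.eq_iff_iff]
    simp only [beq_iff_eq]
    constructor <;> intro hc <;> exfalso <;> apply hl <;>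
      have := congrArg List.length hc <;>
      simpa [PySem.List.length_pyRange_one] using this

-- ===== VERDICT (by name: the statement is the Claim_ definition above) =====
theorem boop_spec : Claim_equal_boop := by
  intro noise _
  unfold Spec_boop
  exact boop_key noise
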